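-- pv_equiv track=rewrite | github.com/TatianaSenatorova/Python | seminar_fifth/task_2.py | fill_new_list
-- ===== SOURCE A (Python) =====
-- def fill_new_list(new_list: list):
--     my_list = []
--     for i in range(len(new_list)):
--         f = new_list[i]
--         list_1 = [f]
--         for x in range(i + 1, len(new_list)):
--                 if new_list[x] > f:
--                      f = new_list[x]
--                      list_1.append(f)
--         if len(list_1) > 1:
--             my_list.append(list_1)
--     return  my_list
-- ===== SOURCE B (Python) =====
-- def fill_new_list(new_list: list):
--     # Back-to-front DP: the maxima chain of suffix i is new_list[i] followed by
--     # the elements of the chain of suffix i+1 that exceed new_list[i].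
--     chain = []
--     chains_rev = []
--     for v in reversed(new_list):
--         chain = [v] + [c for c in chain if c > v]
--         if len(chain) > 1:
--             chains_rev.append(chain)
--     return chains_rev[::-1]
-- ===== Notes on version B (the rewrite author's own statement) =====
-- stated objective: alternative
-- what changed: Replaces the per-start-index rescan of the whole suffix with a single back-to-front pass that maintains the maxima chain of the current suffix via the recurrence chain(i) = [a_i] + [c for c in chain(i+1) if c > a_i], collecting qualifying chains in reverse and reversing once at the end.
import Mathlib
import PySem

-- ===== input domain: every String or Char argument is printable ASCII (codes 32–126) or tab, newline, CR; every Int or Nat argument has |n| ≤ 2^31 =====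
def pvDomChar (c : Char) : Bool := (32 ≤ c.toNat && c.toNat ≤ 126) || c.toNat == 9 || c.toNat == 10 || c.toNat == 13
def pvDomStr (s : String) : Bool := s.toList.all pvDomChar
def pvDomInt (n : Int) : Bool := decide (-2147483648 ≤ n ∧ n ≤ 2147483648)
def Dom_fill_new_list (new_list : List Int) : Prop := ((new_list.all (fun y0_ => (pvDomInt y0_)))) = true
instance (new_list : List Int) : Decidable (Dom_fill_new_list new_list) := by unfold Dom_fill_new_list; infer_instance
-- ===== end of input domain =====

-- B replaces A's per-start-index suffix rescan by one back-to-front pass maintaining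
-- the current suffix's maxima chain (alternative decomposition; return value only).

-- ===== PORT A =====
def fill_new_list (new_list : List Int) : List (List Int) :=
  (PySem.List.pyRange 0 (PySem.List.len new_list) 1).foldl
    (fun my_list i =>
      let f := PySem.List.pyGetD new_list i 0
      let st := (PySem.List.pyRange (i + 1) (PySem.List.len new_list) 1).foldl
        (fun (p : Int × List Int) x =>
          let v := PySem.List.pyGetD new_list x 0
          if v > p.1 then (v, p.2 ++ [v]) else p) (f, [f])
      if st.2.length > 1 then my_list ++ [st.2] else my_list) []

-- ===== PORT B =====
def fill_new_list_alt (new_list : List Int) : List (List Int) :=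
  let st := new_list.reverse.foldl
    (fun (p : List Int × List (List Int)) v =>
      let chain := v :: p.1.filter (fun c => c > v)
      (chain, if chain.length > 1 then p.2 ++ [chain] else p.2)) ([], [])
  st.2.reverse

-- ===== PRECONDITION & SPEC =====
def Spec_fill_new_list (new_list : List Int) (out : List (List Int)) : Prop := out = fill_new_list_alt new_list
instance (new_list : List Int) (out : List (List Int)) : Decidable (Spec_fill_new_list new_list out) := by unfold Spec_fill_new_list; infer_instance

-- ===== CLAIM (what is proved, stated in full; the proofs are below) =====
def Claim_equal_fill_new_list : Prop := ∀ (new_list : List Int), Dom_fill_new_list new_list → Spec_fill_new_list new_list (fill_new_list new_list)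

-- ===== LEMMAS AND PROOFS =====

/-- The strictly increasing maxima chain (record values) of a list. -/
def pvRecords : List Int → List Int
  | [] => []
  | v :: l => v :: (pvRecords l).filter (fun c => c > v)

/-- All maxima chains of suffixes, front to back, keeping only those of length > 1. -/
def pvSpecAll : List Int → List (List Int)
  | [] => []
  | v :: l =>
    (if (pvRecords (v :: l)).length > 1 then [pvRecords (v :: l)] else []) ++ pvSpecAll l

/-- A's inner loop tail: records of `l` that exceed the running max `f`. -/
def pvTail (f : Int) : List Int → List Int
  | [] => []
  | x :: l => if x > f then x :: pvTail x l else pvTail f l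

lemma pvFilter_records (f : Int) (l : List Int) :
    (pvRecords l).filter (fun c => c > f) = pvTail f l := by
  induction l generalizing f with
  | nil => rfl
  | cons x l ih =>
    by_cases hx : x > f
    · simp only [pvRecords, pvTail, List.filter_cons, hx, decide_true, List.filter_filter]
      have hfc : List.filter (fun a => decide (a > f) && decide (a > x)) (pvRecords l)
          = List.filter (fun c => decide (c > x)) (pvRecords l) := by
        apply List.filter_congr
        intro a _
        by_cases h : a > x
        · have : a > f := by omega
          simp [h, this]
        · simp [h]
      rw [hfc, ih x]
      simp
    -- x ≤ f: drop x, and (> x) is implied by (> f)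
    · simp only [pvRecords, pvTail, List.filter_cons, hx, decide_false, Bool.false_eq_true,
        List.filter_filter]
      have hfc : List.filter (fun a => decide (a > f) && decide (a > x)) (pvRecords l)
          = List.filter (fun c => decide (c > f)) (pvRecords l) := by
        apply List.filter_congr
        intro a _
        by_cases h : a > f
        · have : a > x := by omega
          simp [h, this]
        · simp [h]
      rw [hfc, ih f]
      simp

/-- Unrolling A's inner fold: the accumulated list grows by `pvTail`. -/
lemma pvInner_fold (l : List Int) (f : Int) (acc : List Int) :
    (l.foldl (fun (p : Int × List Int) v =>
        if v > p.1 then (v, p.2 ++ [v]) else p) (f, acc)).2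
      = acc ++ pvTail f l := by
  induction l generalizing f acc with
  | nil => simp [pvTail]
  | cons x l ih =>
    by_cases hx : x > f
    · simp only [List.foldl_cons, pvTail, if_pos hx]
      rw [ih]
      simp
    · simp only [List.foldl_cons, pvTail, if_neg hx]
      rw [ih]

lemma pvRecords_cons_tail (v : Int) (l : List Int) :
    pvRecords (v :: l) = v :: pvTail v l := by
  simp [pvRecords, pvFilter_records]

/-- A's outer loop from index `j` produces the suffix chains of `drop j`. -/
lemma pvOuterA (new_list : List Int) (j : Nat) (hj : j ≤ new_list.length)
    (acc : List (List Int)) :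
    (PySem.List.pyRange (j : Int) (PySem.List.len new_list) 1).foldl
      (fun my_list i =>
        let f := PySem.List.pyGetD new_list i 0
        let st := (PySem.List.pyRange (i + 1) (PySem.List.len new_list) 1).foldl
          (fun (p : Int × List Int) x =>
            let v := PySem.List.pyGetD new_list x 0
            if v > p.1 then (v, p.2 ++ [v]) else p) (f, [f])
        if st.2.length > 1 then my_list ++ [st.2] else my_list) acc
      = acc ++ pvSpecAll (new_list.drop j) := by
  induction h : new_list.length - j generalizing j acc with
  | zero =>
    have hje : j = new_list.length := by omega
    rw [PySem.List.pyRange_one_eq_nil (by simp [hje])]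
    simp [hje, pvSpecAll]
  | succ n ih =>
    have hjlt : j < new_list.length := by omega
    rw [PySem.List.pyRange_one_cons (by simp; omega)]
    simp only [List.foldl_cons]
    have hdrop : new_list.drop j = new_list[j] :: new_list.drop (j + 1) :=
      List.drop_eq_getElem_cons hjlt
    have hget : PySem.List.pyGetD new_list (j : Int) 0 = new_list[j] := by
      simp [PySem.List.pyGetD_natCast, List.getD_eq_getElem?_getD, hjlt]
    -- inner fold over pyRange (j+1) len via foldl_pyRange_pyGetD
    have hinner := PySem.List.foldl_pyRange_pyGetD (xs := new_list) (a := (j : Int) + 1)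
      (d := 0)
      (f := fun (p : Int × List Int) v => if v > p.1 then (v, p.2 ++ [v]) else p)
      (init := (new_list[j], [new_list[j]])) (by omega)
    have hcast : ((j : Int) + 1).toNat = j + 1 := by omega
    rw [hcast] at hinner
    have h1 : ((j : Int) + 1 : Int) = ((j + 1 : Nat) : Int) := by push_cast; ring
    simp only [hget]
    rw [hinner, pvInner_fold, h1, ih (j + 1) (by omega) _ (by omega)]
    rw [hdrop]
    simp only [pvSpecAll, pvRecords_cons_tail]
    by_cases hlen : (new_list[j] :: pvTail new_list[j] (new_list.drop (j + 1))).length > 1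
    · rw [if_pos (by simpa using hlen), if_pos hlen]; simp
    · rw [if_neg (by simpa using hlen), if_neg hlen]; simp

/-- B's fold over the reversed list maintains (records of suffix, chains so far reversed). -/
lemma pvFoldB (l : List Int) :
    l.reverse.foldl
      (fun (p : List Int × List (List Int)) v =>
        let chain := v :: p.1.filter (fun c => c > v)
        (chain, if chain.length > 1 then p.2 ++ [chain] else p.2)) ([], [])
      = (pvRecords l, (pvSpecAll l).reverse) := by
  induction l with
  | nil => rfl
  | cons v l ih =>
    rw [List.reverse_cons, List.foldl_append, ih]
    simp only [List.foldl_cons, List.foldl_nil]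
    have hch : v :: (pvRecords l).filter (fun c => c > v) = pvRecords (v :: l) := rfl
    simp only [hch, pvSpecAll]
    by_cases hlen : (pvRecords (v :: l)).length > 1
    · rw [if_pos hlen, if_pos hlen]; simp
    · rw [if_neg hlen, if_neg hlen]; simp

-- ===== VERDICT (by name: the statement is the Claim_ definition above) =====
theorem fill_new_list_spec : Claim_equal_fill_new_list := by
  intro new_list _
  unfold Spec_fill_new_list fill_new_list fill_new_list_alt
  have h := pvOuterA new_list 0 (by omega) []
  simp only [Nat.cast_zero, List.drop_zero, List.nil_append] at h
  rw [h, pvFoldB]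
  simp
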